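-- pv_equiv track=rewrite | github.com/ari1008/API_TDL-1 | Selectscrapper.py | recoveryDesc
-- ===== SOURCE A (Python) =====
-- def recoveryDesc(tab , index):
--     desc = (tab[index])[tab[index].find('content='):]
--     while True:
--         index = index + 1
--         if '">' in tab[index]:
--             break
--         desc = desc + " " +  tab[index]
--     desc = desc + " " +  (tab[index])[:len(tab[index])-2]
--     return desc
-- ===== SOURCE B (Python) =====
-- def recoveryDesc(tab, index):
--     # Phase 1 (declarative): collect every terminator position after `index`; the cut point
--     # is the first one.  No break/early-exit loop: the whole tail is filtered at once.
--     j = [k for k in range(index + 1, len(tab)) if '">' in tab[k]][0]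
--     # Phase 2: build the description back-to-front, starting from the trimmed terminator
--     # line and prepending the middle lines right-to-left.
--     out = tab[j][:-2]
--     for k in range(j - 1, index, -1):
--         out = tab[k] + " " + out
--     head = tab[index]
--     return head[head.find('content='):] + " " + out
-- ===== Notes on version B (the rewrite author's own statement) =====
-- stated objective: alternative
-- what changed: B replaces A's single forward scan-with-break that grows the string left-to-right by two independent phases: a declarative filter of the whole tail whose first element is the terminator index (no early exit, order irrelevant since the first hit is taken), then a countdown loop that assembles the result back-to-front starting from the trimmed terminator line.
import Mathlib
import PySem

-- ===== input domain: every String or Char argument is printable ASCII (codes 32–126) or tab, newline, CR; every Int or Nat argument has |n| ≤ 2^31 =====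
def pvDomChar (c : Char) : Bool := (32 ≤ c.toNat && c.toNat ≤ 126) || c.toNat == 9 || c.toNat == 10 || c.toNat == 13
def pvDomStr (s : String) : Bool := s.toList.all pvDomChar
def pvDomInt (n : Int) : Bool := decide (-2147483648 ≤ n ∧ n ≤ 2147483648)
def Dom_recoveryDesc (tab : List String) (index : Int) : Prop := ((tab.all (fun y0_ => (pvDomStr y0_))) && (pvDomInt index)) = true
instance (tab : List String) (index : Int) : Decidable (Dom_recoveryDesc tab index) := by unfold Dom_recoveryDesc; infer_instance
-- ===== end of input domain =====

-- B replaces A's interleaved forward scan-and-concatenate by a filter of the whole tail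
-- (first hit = terminator) plus a countdown loop building the result back-to-front
-- (equal return values; no mutation).

-- ===== PORT A =====
-- A's 'while True' loop: fuel bounds the steps; the none/0 branches are Python's IndexError,
-- excluded by Pre_recoveryDesc.
def recoveryDescLoopA (tab : List String) : Nat → Int → String → String
  | 0, _, desc => desc
  | fuel+1, i, desc =>
    match PySem.List.pyGet? tab (i + 1) with
    | none => desc
    | some s =>
      if PySem.Str.isIn "\">" s then
        desc ++ " " ++ PySem.Str.slice s none (some ((PySem.Str.len s : Int) - 2))
      else
        recoveryDescLoopA tab fuel (i + 1) (desc ++ " " ++ s)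

def recoveryDesc (tab : List String) (index : Int) : String :=
  match PySem.List.pyGet? tab index with
  | none => ""
  | some s0 =>
    recoveryDescLoopA tab (2 * tab.length + 1) index
      (PySem.Str.slice s0 (some (PySem.Str.find s0 "content=")) none)

-- ===== PORT B =====
-- phase 1: the list comprehension '[k for k in range(index+1, len(tab)) if '">' in tab[k]]';
-- its '[0]' is the match on the head ([] = Python's IndexError, outside Pre_).
-- phase 2: the countdown loop 'for k in range(j-1, index, -1)' prepending lines.
def recoveryDesc_alt (tab : List String) (index : Int) : String :=
  let hits := (PySem.List.pyRange (index + 1) (tab.length : Int) 1).filter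
      (fun k => PySem.Str.isIn "\">" (PySem.List.pyGetD tab k ""))
  match hits with
  | [] => ""
  | j :: _ =>
    let out := (PySem.List.pyRange (j - 1) index (-1)).foldl
        (fun acc k => PySem.List.pyGetD tab k "" ++ " " ++ acc)
        (PySem.Str.slice (PySem.List.pyGetD tab j "") none (some (-2)))
    match PySem.List.pyGet? tab index with
    | none => ""
    | some s0 => PySem.Str.slice s0 (some (PySem.Str.find s0 "content=")) none ++ " " ++ out

-- ===== PRECONDITION & SPEC =====
-- Pre_ = exactly the inputs where A returns: index in Python's (possibly negative) range, and
-- some later raw index j < len carries the '">' terminator (otherwise A raises IndexError).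
def Pre_recoveryDesc (tab : List String) (index : Int) : Prop :=
  -(tab.length : Int) ≤ index ∧ index < tab.length ∧
    ∃ j ∈ PySem.List.pyRange (index + 1) tab.length 1,
      PySem.Str.isIn "\">" (PySem.List.pyGetD tab j "") = true
instance (tab : List String) (index : Int) : Decidable (Pre_recoveryDesc tab index) := by
  unfold Pre_recoveryDesc; infer_instance

def pvWitness_recoveryDesc : List String × Int := (["content=a b", "c\">"], 0)

def Spec_recoveryDesc (tab : List String) (index : Int) (out : String) : Prop := out = recoveryDesc_alt tab index
instance (tab : List String) (index : Int) (out : String) : Decidable (Spec_recoveryDesc tab index out) := by unfold Spec_recoveryDesc; infer_instance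

-- ===== CLAIM (what is proved, stated in full; the proofs are below) =====
def Claim_equal_recoveryDesc : Prop := ∀ (tab : List String) (index : Int), Dom_recoveryDesc tab index → Pre_recoveryDesc tab index → Spec_recoveryDesc tab index (recoveryDesc tab index)

-- ===== LEMMAS AND PROOFS =====

-- pyGet? succeeds (with the pyGetD value) exactly on Python's index range.
lemma pyGet?_eq_some_getD (xs : List String) (i : Int)
    (h1 : -(xs.length : Int) ≤ i) (h2 : i < xs.length) :
    PySem.List.pyGet? xs i = some (PySem.List.pyGetD xs i "") := by
  simp only [PySem.List.pyGet?, PySem.List.pyIdx?, PySem.List.pyGetD]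
  by_cases h0 : 0 ≤ i
  · simp [h0, h2]
  · have hlt : xs.length - (-i).toNat < xs.length := by omega
    simp [h0, h1, List.getElem?_eq_getElem hlt]

-- A's final slice s[:len(s)-2] equals B's s[:-2] for every length.
lemma slice_len_sub_two (s : String) :
    PySem.Str.slice s none (some ((PySem.Str.len s : Int) - 2)) =
      PySem.Str.slice s none (some (-2)) := by
  apply String.toList_inj.mp
  simp only [PySem.Str.toList_slice, PySem.Chars.slice_eq_listSlice, PySem.Str.len_eq]
  rcases Nat.lt_or_ge s.toList.length 2 with h | h
  · have h01 : s.toList.length = 0 ∨ s.toList.length = 1 := by omega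
    rcases h01 with h0 | h1
    · have e : ((s.toList.length : Int) - 2) = -2 := by omega
      rw [e]
    · have e : ((s.toList.length : Int) - 2) = -1 := by omega
      rw [e, PySem.List.slice_to_neg_one, PySem.List.slice_to_neg_ofNat s.toList 2 (by omega),
        List.dropLast_eq_take]
      rw [h1]
  · have e : ((s.toList.length : Int) - 2) = ((s.toList.length - 2 : Nat) : Int) := by omega
    rw [e, PySem.List.slice_to_natCast, PySem.List.slice_to_neg_ofNat s.toList 2 (by omega)]

-- A's loop from raw index i, when j is the FIRST terminator index past i, equals the
-- space-separated foldr of the middle lines onto the trimmed terminator line.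
lemma loopA_eq (tab : List String) : ∀ (fuel : Nat) (i : Int) (desc : String) (j : Int),
    -(tab.length : Int) ≤ i → i < j → j < tab.length → j - i ≤ fuel →
    PySem.Str.isIn "\">" (PySem.List.pyGetD tab j "") = true →
    (∀ k, i < k → k < j → PySem.Str.isIn "\">" (PySem.List.pyGetD tab k "") = false) →
    recoveryDescLoopA tab fuel i desc =
      desc ++ " " ++
        (PySem.List.pyRange (i + 1) j 1).foldr
          (fun k r => PySem.List.pyGetD tab k "" ++ " " ++ r)
          (PySem.Str.slice (PySem.List.pyGetD tab j "") none (some (-2))) := by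
  intro fuel
  induction fuel with
  | zero => intro i desc j _ hij _ hf _ _; exact absurd hf (by omega)
  | succ fuel ih =>
    intro i desc j hlow hij hjl hf hterm hmin
    have hg : PySem.List.pyGet? tab (i + 1) = some (PySem.List.pyGetD tab (i + 1) "") :=
      pyGet?_eq_some_getD tab (i + 1) (by omega) (by omega)
    by_cases hc : PySem.Str.isIn "\">" (PySem.List.pyGetD tab (i + 1) "") = true
    · have hje : j = i + 1 := by
        by_contra hne
        have : i + 1 < j := by omega
        have h2 := hmin (i + 1) (by omega) this
        rw [hc] at h2
        simp at h2
      simp only [recoveryDescLoopA, hg, hc, if_true]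
      subst hje
      rw [PySem.List.pyRange_one_eq_nil (le_refl _), List.foldr_nil, slice_len_sub_two]
    · simp only [Bool.not_eq_true] at hc
      simp only [recoveryDescLoopA, hg, hc, Bool.false_eq_true, if_false]
      have hij' : i + 1 < j := by
        rcases lt_or_eq_of_le (by omega : i + 1 ≤ j) with h | h
        · exact h
        · rw [← h] at hterm; rw [hterm] at hc; exact absurd hc (by simp)
      rw [ih (i + 1) (desc ++ " " ++ PySem.List.pyGetD tab (i + 1) "") j (by omega) hij' hjl
        (by omega) hterm (fun k hk1 hk2 => hmin k (by omega) hk2)]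
      rw [PySem.List.pyRange_one_cons hij', List.foldr_cons]
      simp [String.append_assoc]

-- B's countdown foldl equals the same foldr over the ascending middle range.
lemma foldback_eq (tab : List String) (index : Int) : ∀ (n : Nat) (i : Int) (acc : String),
    (i - index).toNat = n → index ≤ i →
    (PySem.List.pyRange i index (-1)).foldl
        (fun acc k => PySem.List.pyGetD tab k "" ++ " " ++ acc) acc =
      (PySem.List.pyRange (index + 1) (i + 1) 1).foldr
        (fun k r => PySem.List.pyGetD tab k "" ++ " " ++ r) acc := by
  intro n
  induction n with
  | zero =>
    intro i acc hn hle
    have hie : i = index := by omega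
    subst hie
    rw [PySem.List.pyRange_neg_one_eq_nil (le_refl _),
      PySem.List.pyRange_one_eq_nil (le_refl _), List.foldl_nil, List.foldr_nil]
  | succ n ih =>
    intro i acc hn hle
    have hlt : index < i := by omega
    rw [PySem.List.pyRange_neg_one_cons hlt, List.foldl_cons,
      ih (i - 1) (PySem.List.pyGetD tab i "" ++ " " ++ acc) (by omega) (by omega),
      show i - 1 + 1 = i from by omega,
      PySem.List.pyRange_one_succ_right (by omega : index + 1 ≤ i),
      List.foldr_append, List.foldr_cons, List.foldr_nil]

-- The head of the filtered ascending range is the minimal terminator index.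
lemma filter_head_min (tab : List String) (index j : Int) (rest : List Int)
    (h : (PySem.List.pyRange (index + 1) (tab.length : Int) 1).filter
        (fun k => PySem.Str.isIn "\">" (PySem.List.pyGetD tab k "")) = j :: rest) :
    index < j ∧ j < tab.length ∧
      PySem.Str.isIn "\">" (PySem.List.pyGetD tab j "") = true ∧
      ∀ k, index < k → k < j → PySem.Str.isIn "\">" (PySem.List.pyGetD tab k "") = false := by
  have hjmem : j ∈ (PySem.List.pyRange (index + 1) (tab.length : Int) 1).filter
      (fun k => PySem.Str.isIn "\">" (PySem.List.pyGetD tab k "")) := by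
    rw [h]; exact List.mem_cons_self
  obtain ⟨hjr, hjp⟩ := List.mem_filter.mp hjmem
  obtain ⟨hj1, hj2⟩ := PySem.List.mem_pyRange_one.mp hjr
  refine ⟨by omega, hj2, hjp, ?_⟩
  intro k hk1 hk2
  by_contra hkp
  simp only [Bool.not_eq_false] at hkp
  have hkmem : k ∈ j :: rest := by
    rw [← h]
    exact List.mem_filter.mpr ⟨PySem.List.mem_pyRange_one.mpr ⟨by omega, by omega⟩, hkp⟩
  have hpw : (j :: rest).Pairwise (· < ·) := by
    rw [← h]
    exact (PySem.List.pairwise_lt_pyRange_one _ _).filter _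
  rcases List.mem_cons.mp hkmem with hkj | hkr
  · omega
  · have := (List.pairwise_cons.mp hpw).1 k hkr
    omega

-- ===== VERDICT (by name: the statement is the Claim_ definition above) =====
theorem recoveryDesc_spec : Claim_equal_recoveryDesc := by
  intro tab index _hdom hpre
  obtain ⟨h1, h2, j0, hj0mem, hj0term⟩ := hpre
  unfold Spec_recoveryDesc recoveryDesc recoveryDesc_alt
  have hg0 : PySem.List.pyGet? tab index = some (PySem.List.pyGetD tab index "") :=
    pyGet?_eq_some_getD tab index h1 h2
  cases hhits : (PySem.List.pyRange (index + 1) (tab.length : Int) 1).filter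
      (fun k => PySem.Str.isIn "\">" (PySem.List.pyGetD tab k "")) with
  | nil =>
    exfalso
    have : j0 ∈ (PySem.List.pyRange (index + 1) (tab.length : Int) 1).filter
        (fun k => PySem.Str.isIn "\">" (PySem.List.pyGetD tab k "")) :=
      List.mem_filter.mpr ⟨hj0mem, hj0term⟩
    rw [hhits] at this
    exact absurd this (List.not_mem_nil)
  | cons j rest =>
    obtain ⟨hj1, hj2, hjp, hmin⟩ := filter_head_min tab index j rest hhits
    rw [hg0]
    dsimp only
    rw [loopA_eq tab (2 * tab.length + 1) index _ j h1 hj1 hj2 (by omega) hjp hmin]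
    rw [foldback_eq tab index (j - 1 - index).toNat (j - 1) _ rfl (by omega)]
    rw [show j - 1 + 1 = j from by omega]
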